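-- pv_equiv track=rewrite | github.com/anis105/CBDL | report_kit/loader/game_data.py | _find_best_csv
-- ===== SOURCE A (Python) =====
-- def _find_best_csv(path_dict: dict, label_short: str) -> str:
--     """从path_dict中找最匹配的文件路径。"""
--     # 优先找包含多赛事合并的（如"世界杯资格赛_欧洲杯"）
--     for key, path in path_dict.items():
--         if label_short in key and '_' in key:
--             return path
--     # 再找单赛事的
--     for key, path in path_dict.items():
--         if label_short in key:
--             return path
--     # 都没有就返回第一个
--     if path_dict:
--         return next(iter(path_dict.values()))
--     return ''
-- ===== SOURCE B (Python) =====
-- _MISSING = object()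
--
-- def _find_best_csv(path_dict: dict, label_short: str) -> str:
--     """One pass: return immediately on a key containing both label_short and '_';
--     record the first key containing only label_short as a fallback."""
--     fallback = _MISSING
--     for key, path in path_dict.items():
--         if label_short in key:
--             if '_' in key:
--                 return path
--             if fallback is _MISSING:
--                 fallback = path
--     if fallback is not _MISSING:
--         return fallback
--     if path_dict:
--         return next(iter(path_dict.values()))
--     return ''
-- ===== Notes on version B (the rewrite author's own statement) =====
-- stated objective: alternative
-- what changed: A's two sequential scans (both-match pass, then contain-only pass) are merged into a single pass that short-circuits on a both-match and records the first contain-only path in a sentinel-guarded fallback variable.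
import Mathlib
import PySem

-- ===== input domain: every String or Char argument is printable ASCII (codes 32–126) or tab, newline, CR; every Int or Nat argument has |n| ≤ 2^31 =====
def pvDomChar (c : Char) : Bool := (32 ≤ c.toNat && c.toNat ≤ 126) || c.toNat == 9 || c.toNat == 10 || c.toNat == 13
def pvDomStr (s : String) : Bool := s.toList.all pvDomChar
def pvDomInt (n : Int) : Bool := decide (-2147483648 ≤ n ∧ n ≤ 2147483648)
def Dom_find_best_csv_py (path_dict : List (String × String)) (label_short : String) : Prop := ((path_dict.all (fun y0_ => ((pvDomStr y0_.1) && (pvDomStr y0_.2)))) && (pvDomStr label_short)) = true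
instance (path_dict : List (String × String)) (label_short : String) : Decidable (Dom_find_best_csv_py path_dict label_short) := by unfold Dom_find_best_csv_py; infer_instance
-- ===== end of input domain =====

-- B merges A's two sequential scans into one pass with a sentinel-guarded fallback (same result, alternative decomposition).


-- ===== PORT A =====
-- first for-loop of A: return path of the first key containing both label_short and '_'
def fbLoopBoth (label_short : String) : List (String × String) → Option String
  | [] => none
  | (key, path) :: rest =>
      if PySem.Str.isIn label_short key && PySem.Str.isIn "_" key then some path
      else fbLoopBoth label_short rest

-- second for-loop of A: return path of the first key containing label_short
def fbLoopContain (label_short : String) : List (String × String) → Option String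
  | [] => none
  | (key, path) :: rest =>
      if PySem.Str.isIn label_short key then some path
      else fbLoopContain label_short rest

def find_best_csv_py (path_dict : List (String × String)) (label_short : String) : String :=
  match fbLoopBoth label_short path_dict with
  | some path => path
  | none =>
    match fbLoopContain label_short path_dict with
    | some path => path
    | none =>
      match path_dict with
      | (_, path) :: _ => path
      | [] => ""

-- ===== PORT B =====
-- B's single loop: `fb` is the sentinel-guarded fallback (none = unset), `dflt` the after-loop default
def fbAltLoop (label_short : String) (dflt : String) : List (String × String) → Option String → String
  | [], none => dflt
  | [], some fb => fb
  | (key, path) :: rest, fb =>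
      if PySem.Str.isIn label_short key then
        if PySem.Str.isIn "_" key then path
        else fbAltLoop label_short dflt rest (if fb.isNone then some path else fb)
      else fbAltLoop label_short dflt rest fb

def find_best_csv_py_alt (path_dict : List (String × String)) (label_short : String) : String :=
  fbAltLoop label_short
    (match path_dict with | (_, path) :: _ => path | [] => "")
    path_dict none

-- ===== PRECONDITION & SPEC =====
def Spec_find_best_csv_py (path_dict : List (String × String)) (label_short : String) (out : String) : Prop := out = find_best_csv_py_alt path_dict label_short
instance (path_dict : List (String × String)) (label_short : String) (out : String) : Decidable (Spec_find_best_csv_py path_dict label_short out) := by unfold Spec_find_best_csv_py; infer_instance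

-- ===== CLAIM (what is proved, stated in full; the proofs are below) =====
def Claim_equal_find_best_csv_py : Prop := ∀ (path_dict : List (String × String)) (label_short : String), Dom_find_best_csv_py path_dict label_short → Spec_find_best_csv_py path_dict label_short (find_best_csv_py path_dict label_short)

-- ===== LEMMAS AND PROOFS =====
theorem fbAltLoop_eq (label_short dflt : String) (l : List (String × String)) :
    ∀ fb : Option String,
    fbAltLoop label_short dflt l fb =
      match fbLoopBoth label_short l with
      | some p => p
      | none =>
        match fb with
        | some f => f
        | none =>
          match fbLoopContain label_short l with
          | some p => p
          | none => dflt := by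
  induction l with
  | nil => intro fb; cases fb <;> rfl
  | cons hd tl ih =>
    intro fb
    obtain ⟨key, path⟩ := hd
    by_cases hc : PySem.Str.isIn label_short key = true
    · by_cases hu : PySem.Str.isIn "_" key = true
      · simp only [fbAltLoop, fbLoopBoth, hc, hu, Bool.and_self, if_true]
      · simp only [fbAltLoop, fbLoopBoth, fbLoopContain, hc, hu, Bool.and_false, Bool.false_eq_true,
          if_true, if_false]
        rw [ih]
        cases fb <;> cases h : fbLoopBoth label_short tl <;> simp only [Option.isNone] <;> rfl
    · simp only [fbAltLoop, fbLoopBoth, fbLoopContain, hc, Bool.false_and, Bool.false_eq_true,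
        if_false]
      exact ih fb

-- ===== VERDICT (by name: the statement is the Claim_ definition above) =====
theorem find_best_csv_py_spec : Claim_equal_find_best_csv_py := by
  intro path_dict label_short _
  unfold Spec_find_best_csv_py find_best_csv_py find_best_csv_py_alt
  rw [fbAltLoop_eq]
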